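-- pv_equiv track=rewrite | github.com/jblackburne/aoc23 | p02.py | p02a
-- ===== SOURCE A (Python) =====
-- def p02a(data, maxrgb):
--     """Returns the sum of the game IDs of games that are possible given maxrgb.
--     """
--     maxred, maxgreen, maxblue = maxrgb
--     validGames = []
--     for gameID, gamedicts in data:
--         gamered = max([d.get("red", 0) for d in gamedicts])
--         gamegreen = max([d.get("green", 0) for d in gamedicts])
--         gameblue = max([d.get("blue", 0) for d in gamedicts])
--         if gamered <= maxred and gamegreen <= maxgreen and gameblue <= maxblue:
--             validGames.append(gameID)
--
--     return sum(validGames)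
-- ===== SOURCE B (Python) =====
-- def p02a(data, maxrgb):
--     """Returns the sum of the game IDs of games that are possible given maxrgb."""
--     maxred, maxgreen, maxblue = maxrgb
--     total = 0
--     for gameID, gamedicts in data:
--         if all(d.get("red", 0) <= maxred
--                and d.get("green", 0) <= maxgreen
--                and d.get("blue", 0) <= maxblue for d in gamedicts):
--             total += gameID
--     return total
-- ===== Notes on version B (the rewrite author's own statement) =====
-- stated objective: idiomatic
-- what changed: Replaces the three per-color max-list computations plus a validGames list and final sum with a single running total and one short-circuiting all() predicate over the draws of each game.
-- outside the precondition, e.g. on p02a([(5, [])], (1, 1, 1)): A raises ValueError, B returns 5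
-- crash fix: On inputs where some game has an empty draw list A raises ValueError (max of an empty list) while B returns the sum counting that vacuously-possible game. — e.g. on p02a([(5, [])], (1, 1, 1)): A raises ValueError, B returns 5
import Mathlib
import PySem

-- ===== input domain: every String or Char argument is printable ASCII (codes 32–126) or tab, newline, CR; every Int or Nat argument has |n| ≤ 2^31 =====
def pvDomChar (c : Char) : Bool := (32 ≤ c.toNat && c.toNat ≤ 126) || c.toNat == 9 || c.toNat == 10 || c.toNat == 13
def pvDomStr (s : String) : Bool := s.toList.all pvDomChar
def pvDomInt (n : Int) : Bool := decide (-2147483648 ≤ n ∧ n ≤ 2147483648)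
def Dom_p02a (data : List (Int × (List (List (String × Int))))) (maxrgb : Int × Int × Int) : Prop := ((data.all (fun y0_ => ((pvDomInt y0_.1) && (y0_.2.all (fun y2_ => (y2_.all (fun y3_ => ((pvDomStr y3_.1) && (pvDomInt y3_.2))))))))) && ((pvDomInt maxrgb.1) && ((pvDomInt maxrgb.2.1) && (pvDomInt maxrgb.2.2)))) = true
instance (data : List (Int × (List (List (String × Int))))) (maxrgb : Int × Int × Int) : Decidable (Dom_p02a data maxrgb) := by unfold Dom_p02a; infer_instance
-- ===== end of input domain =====

-- B replaces A's three max-list computations and validGames list with one running total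
-- and a single short-circuiting all-draws predicate per game (idiomatic; same cost).

-- d.get(k, 0) on an association-list dict: first match or default (shared lookup primitive)
def pyGetS (d : List (String × Int)) (k : String) : Int :=
  ((d.find? (fun p => p.1 == k)).map Prod.snd).getD 0

-- ===== PORT A =====
def p02a (data : List (Int × (List (List (String × Int))))) (maxrgb : Int × Int × Int) : Int :=
  let maxred := maxrgb.1
  let maxgreen := maxrgb.2.1
  let maxblue := maxrgb.2.2
  let validGames : List Int := data.foldl (fun validGames g =>
    -- max([...]) : Pre_p02a excludes the empty list, where Python raises ValueError
    let gamered := (PySem.List.max? (g.2.map (fun d => pyGetS d "red")) (fun y => y)).getD 0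
    let gamegreen := (PySem.List.max? (g.2.map (fun d => pyGetS d "green")) (fun y => y)).getD 0
    let gameblue := (PySem.List.max? (g.2.map (fun d => pyGetS d "blue")) (fun y => y)).getD 0
    if gamered ≤ maxred ∧ gamegreen ≤ maxgreen ∧ gameblue ≤ maxblue then
      validGames ++ [g.1]
    else validGames) []
  validGames.sum

-- ===== PORT B =====
def p02a_alt (data : List (Int × (List (List (String × Int))))) (maxrgb : Int × Int × Int) : Int :=
  let maxred := maxrgb.1
  let maxgreen := maxrgb.2.1
  let maxblue := maxrgb.2.2
  data.foldl (fun total g =>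
    if g.2.all (fun d =>
        pyGetS d "red" ≤ maxred && pyGetS d "green" ≤ maxgreen && pyGetS d "blue" ≤ maxblue) then
      total + g.1
    else total) 0

-- ===== PRECONDITION & SPEC =====
-- Pre_ excludes inputs where some game has an empty draw list: there A raises ValueError (max([])).
def Pre_p02a (data : List (Int × (List (List (String × Int))))) (maxrgb : Int × Int × Int) : Prop :=
  ∀ g ∈ data, g.2 ≠ []
instance (data : List (Int × (List (List (String × Int))))) (maxrgb : Int × Int × Int) : Decidable (Pre_p02a data maxrgb) := by unfold Pre_p02a; infer_instance
def pvWitness_p02a : (List (Int × (List (List (String × Int))))) × (Int × Int × Int) :=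
  ([(1, [[("red", 1)], [("blue", 2)]]), (2, [[("green", 7)]])], (3, 3, 3))

-- On inputs where some game has an empty draw list A raises ValueError (max of an empty list)
-- while B returns the sum counting that vacuously-possible game.
def Raises_p02a (data : List (Int × (List (List (String × Int))))) (maxrgb : Int × Int × Int) : Prop :=
  ∃ g ∈ data, g.2 = []
instance (data : List (Int × (List (List (String × Int))))) (maxrgb : Int × Int × Int) : Decidable (Raises_p02a data maxrgb) := by unfold Raises_p02a; infer_instance
def pvRaiseWitness_p02a : (List (Int × (List (List (String × Int))))) × (Int × Int × Int) :=
  ([(5, [])], (1, 1, 1))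
def pvRaiseWitnessOut_p02a : Int := 5

def Spec_p02a (data : List (Int × (List (List (String × Int))))) (maxrgb : Int × Int × Int) (out : Int) : Prop := out = p02a_alt data maxrgb
instance (data : List (Int × (List (List (String × Int))))) (maxrgb : Int × Int × Int) (out : Int) : Decidable (Spec_p02a data maxrgb out) := by unfold Spec_p02a; infer_instance

-- ===== CLAIM (what is proved, stated in full; the proofs are below) =====
def Claim_equal_p02a : Prop := ∀ (data : List (Int × (List (List (String × Int))))) (maxrgb : Int × Int × Int), Dom_p02a data maxrgb → Pre_p02a data maxrgb → Spec_p02a data maxrgb (p02a data maxrgb)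
def Claim_raises_p02a : Prop := (∀ (data : List (Int × (List (List (String × Int))))) (maxrgb : Int × Int × Int), Dom_p02a data maxrgb → Raises_p02a data maxrgb → ¬ Pre_p02a data maxrgb) ∧ (Dom_p02a (pvRaiseWitness_p02a.1) (pvRaiseWitness_p02a.2) ∧ Raises_p02a (pvRaiseWitness_p02a.1) (pvRaiseWitness_p02a.2) ∧ p02a_alt (pvRaiseWitness_p02a.1) (pvRaiseWitness_p02a.2) = pvRaiseWitnessOut_p02a)

-- ===== LEMMAS AND PROOFS =====

-- Python max(l) ≤ r ↔ every element ≤ r, for nonempty l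
lemma maxD_le_iff (l : List Int) (r : Int) (h : l ≠ []) :
    ((PySem.List.max? l (fun y => y)).getD 0 ≤ r ↔ ∀ x ∈ l, x ≤ r) := by
  cases l with
  | nil => exact absurd rfl h
  | cons x t =>
    rw [PySem.List.max?_id_cons]
    simp only [Option.getD_some, List.mem_cons, forall_eq_or_imp]
    constructor
    · intro hle
      have hb := PySem.List.le_foldl_max t x
      exact ⟨le_trans hb.1 hle, fun y hy => le_trans (hb.2 y hy) hle⟩
    · intro ⟨hx, ht⟩
      rcases PySem.List.foldl_max_mem t x with hm | hm
      · rw [hm]; exact hx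
      · exact ht _ hm

-- per-game: A's three-max condition equals B's all-draws test on a nonempty draw list
lemma cond_eq (ds : List (List (String × Int))) (mr mg mb : Int) (h : ds ≠ []) :
    ((((PySem.List.max? (ds.map (fun d => pyGetS d "red")) (fun y => y)).getD 0 ≤ mr ∧
       (PySem.List.max? (ds.map (fun d => pyGetS d "green")) (fun y => y)).getD 0 ≤ mg ∧
       (PySem.List.max? (ds.map (fun d => pyGetS d "blue")) (fun y => y)).getD 0 ≤ mb)) ↔
     (ds.all (fun d => pyGetS d "red" ≤ mr && pyGetS d "green" ≤ mg && pyGetS d "blue" ≤ mb) = true)) := by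
  have hne : ∀ k : String, ds.map (fun d => pyGetS d k) ≠ [] := by
    intro k hk; exact h (List.map_eq_nil_iff.mp hk)
  rw [maxD_le_iff _ _ (hne "red"), maxD_le_iff _ _ (hne "green"), maxD_le_iff _ _ (hne "blue")]
  simp [List.all_eq_true, and_assoc]
  constructor
  · intro ⟨hr, hg, hb⟩ d hd; exact ⟨hr d hd, hg d hd, hb d hd⟩
  · intro hall
    exact ⟨fun d hd => (hall d hd).1, fun d hd => (hall d hd).2.1, fun d hd => (hall d hd).2.2⟩

-- the two folds agree, generalizing the accumulators (sum of A's list = B's running total)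
lemma fold_eq (maxrgb : Int × Int × Int) (data : List (Int × (List (List (String × Int)))))
    (acc : List Int) (h : ∀ g ∈ data, g.2 ≠ []) :
    (data.foldl (fun validGames g =>
      let gamered := (PySem.List.max? (g.2.map (fun d => pyGetS d "red")) (fun y => y)).getD 0
      let gamegreen := (PySem.List.max? (g.2.map (fun d => pyGetS d "green")) (fun y => y)).getD 0
      let gameblue := (PySem.List.max? (g.2.map (fun d => pyGetS d "blue")) (fun y => y)).getD 0
      if gamered ≤ maxrgb.1 ∧ gamegreen ≤ maxrgb.2.1 ∧ gameblue ≤ maxrgb.2.2 then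
        validGames ++ [g.1]
      else validGames) acc).sum =
    data.foldl (fun total g =>
      if g.2.all (fun d =>
          pyGetS d "red" ≤ maxrgb.1 && pyGetS d "green" ≤ maxrgb.2.1 && pyGetS d "blue" ≤ maxrgb.2.2) then
        total + g.1
      else total) acc.sum := by
  induction data generalizing acc with
  | nil => simp
  | cons g t ih =>
    simp only [List.foldl_cons]
    have hcond := cond_eq g.2 maxrgb.1 maxrgb.2.1 maxrgb.2.2 (h g (List.mem_cons_self ..))
    have ht : ∀ g' ∈ t, g'.2 ≠ [] := fun g' hg' => h g' (List.mem_cons_of_mem _ hg')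
    by_cases hc : g.2.all (fun d =>
        pyGetS d "red" ≤ maxrgb.1 && pyGetS d "green" ≤ maxrgb.2.1 && pyGetS d "blue" ≤ maxrgb.2.2) = true
    · rw [if_pos (hcond.mpr hc), if_pos hc, ih _ ht]
      simp
    · rw [if_neg (fun hp => hc (hcond.mp hp)), if_neg hc, ih _ ht]

-- ===== VERDICT (by name: the statement is the Claim_ definition above) =====
theorem p02a_raises : Claim_raises_p02a := by
  unfold Claim_raises_p02a
  refine ⟨?_, by decide⟩
  intro data maxrgb _ ⟨g, hg, hnil⟩ hpre
  exact hpre g hg hnil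

theorem p02a_spec : Claim_equal_p02a := by
  have _ := p02a_raises  -- the raises-claim is part of the delivered verdict
  intro data maxrgb _ hpre
  unfold Spec_p02a p02a p02a_alt
  simpa using fold_eq maxrgb data [] hpre
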